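-- pv_equiv track=rewrite | github.com/emiliehhd/Synteny_project | code/Read_files.py | get_textAssembly
-- ===== SOURCE A (Python) =====
-- def get_textAssembly(string):
--     """ Récupère les assembly dans une chaine de caractère"""
--     assembly1 = ""
--     assembly2 = ""
--     for i in range(len(string)):
--         if string[i:i+4] == "GCA_":
--             if assembly1 == "":
--                 assembly1 = string[i : i+15]
--             else:
--                 assembly2 = string[i : i+15]
--     return assembly1, assembly2
-- ===== SOURCE B (Python) =====
-- def get_textAssembly(string):
--     """ Récupère les assembly dans une chaine de caractère"""
--     first = string.find("GCA_")
--     if first == -1: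
--         return "", ""
--     last = string.rfind("GCA_")
--     if first == last:
--         return string[first:first+15], ""
--     return string[first:first+15], string[last:last+15]
-- ===== Notes on version B (the rewrite author's own statement) =====
-- stated objective: idiomatic
-- what changed: Replaces the explicit index-by-index scan with running accumulator strings by two library searches (str.find for the first occurrence, str.rfind for the last), returning ('','') when there is no match and leaving the second field empty when both searches hit the same single occurrence.
import Mathlib
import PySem

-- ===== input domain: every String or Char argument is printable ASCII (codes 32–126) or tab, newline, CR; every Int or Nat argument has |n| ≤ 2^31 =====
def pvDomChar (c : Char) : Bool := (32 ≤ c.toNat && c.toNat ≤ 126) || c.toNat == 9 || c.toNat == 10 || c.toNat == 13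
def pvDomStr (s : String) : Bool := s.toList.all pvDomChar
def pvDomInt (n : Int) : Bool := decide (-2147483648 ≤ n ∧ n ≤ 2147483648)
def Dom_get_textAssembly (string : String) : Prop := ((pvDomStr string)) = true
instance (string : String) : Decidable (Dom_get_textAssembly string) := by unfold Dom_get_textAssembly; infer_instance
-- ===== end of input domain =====

-- B replaces A's index-by-index scan with two library searches (find for the first
-- occurrence, rfind for the last) — a more idiomatic decomposition, same return value.


-- ===== PORT A =====
-- literal port of A: scan every index i, remember the first match in assembly1,
-- overwrite assembly2 with every later match
def get_textAssembly (string : String) : String × String :=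
  (PySem.List.pyRange 0 (PySem.Str.len string) 1).foldl
    (fun (st : String × String) (i : Int) =>
      if PySem.Str.slice string (some i) (some (i + 4)) = "GCA_" then
        if st.1 = "" then (PySem.Str.slice string (some i) (some (i + 15)), st.2)
        else (st.1, PySem.Str.slice string (some i) (some (i + 15)))
      else st)
    ("", "")

-- ===== PORT B =====
-- literal port of B: str.find / str.rfind from both ends
def get_textAssembly_alt (string : String) : String × String :=
  let first := PySem.Str.find string "GCA_"
  if first = -1 then ("", "")
  else
    let last := PySem.Str.rfind string "GCA_"
    if first = last then (PySem.Str.slice string (some first) (some (first + 15)), "")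
    else (PySem.Str.slice string (some first) (some (first + 15)),
          PySem.Str.slice string (some last) (some (last + 15)))

-- ===== PRECONDITION & SPEC =====
def Spec_get_textAssembly (string : String) (out : String × String) : Prop := out = get_textAssembly_alt string
instance (string : String) (out : String × String) : Decidable (Spec_get_textAssembly string out) := by unfold Spec_get_textAssembly; infer_instance

-- ===== CLAIM (what is proved, stated in full; the proofs are below) =====
def Claim_equal_get_textAssembly : Prop := ∀ (string : String), Dom_get_textAssembly string → Spec_get_textAssembly string (get_textAssembly string)

-- ===== LEMMAS AND PROOFS =====

-- "GCA_" as a character list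
def pvGca : List Char := ['G', 'C', 'A', '_']

-- the 15-character slice starting at nat index j
def pvSl (string : String) (j : ℕ) : String :=
  PySem.Str.slice string (some (j : ℤ)) (some ((j : ℤ) + 15))

-- A's loop body, over nat indices
def pvStepN (string : String) (st : String × String) (j : ℕ) : String × String :=
  if PySem.Str.slice string (some (j : ℤ)) (some ((j : ℤ) + 4)) = "GCA_" then
    if st.1 = "" then (pvSl string j, st.2) else (st.1, pvSl string j)
  else st

-- match predicate
def pvCondB (string : String) (j : ℕ) : Bool := decide (pvGca <+: string.toList.drop j)

-- joint result as a function of the list of match indices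
def pvOut (string : String) (l : List ℕ) : String × String :=
  match l with
  | [] => ("", "")
  | i :: rest =>
      (pvSl string i, if rest.isEmpty then "" else pvSl string ((i :: rest).getLastD 0))

lemma pvRange_zero_natCast (n : ℕ) :
    PySem.List.pyRange 0 (n : ℤ) 1 = List.map (fun j : ℕ => (j : ℤ)) (List.range n) := by
  induction n with
  | zero => simp [PySem.List.pyRange_one_eq_nil]
  | succ n ih =>
    rw [show (((n + 1 : ℕ)) : ℤ) = (n : ℤ) + 1 from by push_cast; ring,
        PySem.List.pyRange_one_succ_right (by positivity), ih]
    simp [List.range_succ]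

lemma pvCond_iff (string : String) (j : ℕ) :
    PySem.Str.slice string (some (j : ℤ)) (some ((j : ℤ) + 4)) = "GCA_" ↔
      pvGca <+: string.toList.drop j := by
  rw [← String.toList_inj, PySem.Str.toList_slice, PySem.Chars.slice_eq_listSlice,
      show ((j : ℤ) + 4) = ((j : ℤ) + ((4 : ℕ) : ℤ)) from by norm_num,
      PySem.List.slice_natCast_add, List.prefix_iff_eq_take]
  exact eq_comm

lemma pvSl_toList (string : String) (j : ℕ) :
    (pvSl string j).toList = List.take 15 (List.drop j string.toList) := by
  unfold pvSl
  rw [PySem.Str.toList_slice, PySem.Chars.slice_eq_listSlice,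
      show ((j : ℤ) + 15) = ((j : ℤ) + ((15 : ℕ) : ℤ)) from by norm_num,
      PySem.List.slice_natCast_add]

lemma pvMatch_lt (string : String) (j : ℕ) (h : pvGca <+: string.toList.drop j) :
    j < string.toList.length := by
  have hle := h.length_le
  simp [pvGca, List.length_drop] at hle
  have hb : string.toList.length = string.length := by simp
  omega

lemma pvSl_ne_empty (string : String) (j : ℕ) (h : pvGca <+: string.toList.drop j) :
    pvSl string j ≠ "" := by
  intro he
  have h1 : (pvSl string j).toList = [] := by rw [he]; rfl
  rw [pvSl_toList] at h1
  have h2 : (List.take 15 (List.drop j string.toList)).length = 0 := by rw [h1]; rfl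
  have hle := h.length_le
  simp [pvGca, List.length_drop] at hle
  simp [List.length_take, List.length_drop] at h2
  omega

lemma pvFoldA (string : String) (l : List ℕ) :
    l.foldl (pvStepN string) ("", "") = pvOut string (l.filter (pvCondB string)) := by
  induction l using List.reverseRecOn with
  | nil => rfl
  | append_singleton l j ih =>
    rw [List.foldl_append, List.foldl_cons, List.foldl_nil, ih, List.filter_append]
    by_cases hc : pvGca <+: string.toList.drop j
    · have hcB : pvCondB string j = true := by simp [pvCondB, hc]
      have hstep : ∀ st : String × String, pvStepN string st j =
          if st.1 = "" then (pvSl string j, st.2) else (st.1, pvSl string j) := by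
        intro st; unfold pvStepN; rw [if_pos ((pvCond_iff string j).2 hc)]
      rw [hstep]
      simp only [List.filter_cons, hcB, List.filter_nil, if_true]
      cases hfl : l.filter (pvCondB string) with
      | nil => simp [pvOut]
      | cons i rest =>
        have himem : i ∈ l.filter (pvCondB string) := by
          rw [hfl]; exact List.mem_cons_self ..
        have hi : pvGca <+: string.toList.drop i := by
          have := (List.mem_filter.1 himem).2
          simpa [pvCondB] using this
        have hne : pvSl string i ≠ "" := pvSl_ne_empty string i hi
        have hlast : ((i :: rest) ++ [j]).getLastD 0 = j := by
          rw [List.getLastD_eq_getLast?, List.getLast?_concat]; rfl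
        have hout2 : pvOut string ((i :: rest) ++ [j]) = (pvSl string i, pvSl string j) := by
          show (pvSl string i,
              if (rest ++ [j]).isEmpty then ""
              else pvSl string ((i :: (rest ++ [j])).getLastD 0)) = _
          rw [show (i :: (rest ++ [j])) = (i :: rest) ++ [j] from rfl, hlast]
          simp
        rw [hout2]
        show (if (pvOut string (i :: rest)).1 = "" then _ else ((pvOut string (i :: rest)).1, pvSl string j)) = _
        have h1 : (pvOut string (i :: rest)).1 = pvSl string i := rfl
        rw [h1, if_neg hne]
    · have hcB : pvCondB string j = false := by simp [pvCondB, hc]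
      have hstep : ∀ st : String × String, pvStepN string st j = st := by
        intro st; unfold pvStepN
        rw [if_neg (fun hh => hc ((pvCond_iff string j).1 hh))]
      rw [hstep]
      simp [hcB]

lemma pvA_eq (string : String) :
    get_textAssembly string =
      pvOut string ((List.range string.toList.length).filter (pvCondB string)) := by
  have hlen : PySem.Str.len string = ((string.toList.length : ℕ) : ℤ) := by simp
  unfold get_textAssembly
  rw [hlen, pvRange_zero_natCast, List.foldl_map]
  exact pvFoldA string _

lemma pvGo_some (s sub : List Char) (k j0 : ℕ) (h0 : sub <+: s.drop j0) (hk : j0 ≤ k)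
    (hmax : ∀ j, j0 < j → j ≤ k → ¬ sub <+: s.drop j) :
    PySem.Chars.rfind.go s sub k = j0 := by
  revert hk hmax
  induction k with
  | zero =>
    intro hk _
    have hj0 : j0 = 0 := Nat.le_zero.1 hk
    subst hj0
    rw [List.drop_zero] at h0
    show (if sub.isPrefixOf s = true then (0 : ℤ) else -1) = 0
    rw [if_pos (List.isPrefixOf_iff_prefix.2 h0)]
  | succ k ih =>
    intro hk hmax
    rw [show PySem.Chars.rfind.go s sub (k + 1) =
        if sub.isPrefixOf (List.drop (k + 1) s) = true then ((k : ℤ) + 1)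
        else PySem.Chars.rfind.go s sub k from rfl]
    by_cases hp : sub <+: s.drop (k + 1)
    · have hj0 : j0 = k + 1 := by
        by_contra hne
        exact hmax (k + 1) (by omega) (le_refl _) hp
      rw [if_pos (List.isPrefixOf_iff_prefix.2 hp), hj0]
      push_cast; ring
    · rw [if_neg (by simpa [List.isPrefixOf_iff_prefix] using hp)]
      have hk' : j0 ≤ k := by
        rcases Nat.eq_or_lt_of_le hk with he | hlt
        · exact absurd (he ▸ h0) hp
        · omega
      exact ih hk' (fun j hj1 hj2 => hmax j hj1 (Nat.le_succ_of_le hj2))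

lemma pvL_sorted (string : String) :
    ((List.range string.toList.length).filter (pvCondB string)).Pairwise (· < ·) :=
  List.pairwise_lt_range.filter _

lemma pvMem_filter_iff (string : String) (j : ℕ) :
    j ∈ (List.range string.toList.length).filter (pvCondB string) ↔
      pvGca <+: string.toList.drop j := by
  constructor
  · intro hm
    have := (List.mem_filter.1 hm).2
    simpa [pvCondB] using this
  · intro hp
    exact List.mem_filter.2 ⟨List.mem_range.2 (pvMatch_lt string j hp),
      by simp [pvCondB, hp]⟩

lemma pvLast_mem (l : List ℕ) (h : l ≠ []) : l.getLastD 0 ∈ l := by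
  induction l using List.reverseRecOn with
  | nil => exact absurd rfl h
  | append_singleton t a _ =>
    rw [List.getLastD_concat]
    exact List.mem_append_right _ (List.mem_singleton_self a)

lemma pvLast_max (l : List ℕ) (h : l.Pairwise (· < ·)) :
    ∀ x ∈ l, x ≤ l.getLastD 0 := by
  induction l using List.reverseRecOn with
  | nil => intro x hx; simp at hx
  | append_singleton t a ih =>
    rw [List.getLastD_concat]
    intro x hx
    rcases List.mem_append.1 hx with h1 | h2
    · exact le_of_lt ((List.pairwise_append.1 h).2.2 x h1 a (List.mem_singleton_self a))
    · simp at h2; omega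

lemma pvFind_nil (string : String)
    (hfl : (List.range string.toList.length).filter (pvCondB string) = []) :
    PySem.Chars.find string.toList pvGca = -1 := by
  rw [PySem.Chars.find_eq_neg_one_iff]
  intro hinf
  obtain ⟨j, hj⟩ := (PySem.Chars.exists_prefix_drop_iff_isIn pvGca string.toList).2
    ((PySem.Chars.isIn_iff_infix pvGca string.toList).2 hinf)
  have := (pvMem_filter_iff string j).2 hj
  rw [hfl] at this
  exact absurd this (List.not_mem_nil)

lemma pvFind_cons (string : String) (i : ℕ) (rest : List ℕ)
    (hfl : (List.range string.toList.length).filter (pvCondB string) = i :: rest) :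
    PySem.Chars.find string.toList pvGca = (i : ℤ) := by
  have hi : pvGca <+: string.toList.drop i :=
    (pvMem_filter_iff string i).1 (by rw [hfl]; exact List.mem_cons_self ..)
  have hmin : ∀ j, pvGca <+: string.toList.drop j → i ≤ j := by
    intro j hp
    have hjm := (pvMem_filter_iff string j).2 hp
    rw [hfl] at hjm
    rcases List.mem_cons.1 hjm with he | hr
    · omega
    · have hs := pvL_sorted string
      rw [hfl] at hs
      exact le_of_lt ((List.pairwise_cons.1 hs).1 j hr)
  have hinf : pvGca <:+: string.toList :=
    (PySem.Chars.isIn_iff_infix pvGca string.toList).1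
      ((PySem.Chars.exists_prefix_drop_iff_isIn pvGca string.toList).1 ⟨i, hi⟩)
  have hnn : 0 ≤ PySem.Chars.find string.toList pvGca :=
    (PySem.Chars.find_nonneg_iff string.toList pvGca).2 hinf
  obtain ⟨hpf, hmin'⟩ := PySem.Chars.find_spec hnn
  have h1 : i ≤ (PySem.Chars.find string.toList pvGca).toNat := hmin _ hpf
  have h2 : ¬ i < (PySem.Chars.find string.toList pvGca).toNat := fun hlt => hmin' i hlt hi
  have h3 : (PySem.Chars.find string.toList pvGca).toNat = i := by omega
  omega

lemma pvRfind_last (string : String) (i : ℕ) (rest : List ℕ)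
    (hfl : (List.range string.toList.length).filter (pvCondB string) = i :: rest) :
    PySem.Chars.rfind string.toList pvGca = (((i :: rest).getLastD 0 : ℕ) : ℤ) := by
  have hmem : (i :: rest).getLastD 0 ∈ (i :: rest) := pvLast_mem _ (by simp)
  have hp : pvGca <+: string.toList.drop ((i :: rest).getLastD 0) :=
    (pvMem_filter_iff string _).1 (by rw [hfl]; exact hmem)
  have hlt := pvMatch_lt string _ hp
  show PySem.Chars.rfind.go string.toList pvGca string.toList.length = _
  apply pvGo_some _ _ _ _ hp (le_of_lt hlt)
  intro j hj1 _ hpj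
  have hjm := (pvMem_filter_iff string j).2 hpj
  rw [hfl] at hjm
  have hs := pvL_sorted string
  rw [hfl] at hs
  have := pvLast_max _ hs j hjm
  omega

lemma pvB_eq (string : String) :
    get_textAssembly_alt string =
      pvOut string ((List.range string.toList.length).filter (pvCondB string)) := by
  have hg : "GCA_".toList = pvGca := rfl
  cases hfl : (List.range string.toList.length).filter (pvCondB string) with
  | nil =>
    have hfind : PySem.Chars.find string.toList pvGca = -1 := pvFind_nil string hfl
    simp only [get_textAssembly_alt, PySem.Str.find_eq, hg, hfind]
    rfl
  | cons i rest =>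
    have hfind : PySem.Chars.find string.toList pvGca = (i : ℤ) := pvFind_cons string i rest hfl
    have hrf : PySem.Chars.rfind string.toList pvGca = (((i :: rest).getLastD 0 : ℕ) : ℤ) :=
      pvRfind_last string i rest hfl
    have hne : (i : ℤ) ≠ -1 := by omega
    cases rest with
    | nil =>
      have hlast : ((i :: ([] : List ℕ)).getLastD 0) = i := rfl
      rw [hlast] at hrf
      simp only [get_textAssembly_alt, PySem.Str.find_eq, PySem.Str.rfind_eq, hg,
        hfind, hrf, if_neg hne]
      rfl
    | cons b t =>
      have hs := pvL_sorted string
      rw [hfl] at hs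
      have hb : i < b := (List.pairwise_cons.1 hs).1 b (List.mem_cons_self ..)
      have hbl : b ≤ (i :: b :: t).getLastD 0 :=
        pvLast_max _ hs b (List.mem_cons_of_mem _ (List.mem_cons_self ..))
      have hne2 : (i : ℤ) ≠ (((i :: b :: t).getLastD 0 : ℕ) : ℤ) := by
        have : i < (i :: b :: t).getLastD 0 := lt_of_lt_of_le hb hbl
        omega
      simp only [get_textAssembly_alt, PySem.Str.find_eq, PySem.Str.rfind_eq, hg,
        hfind, hrf, if_neg hne, if_neg hne2]
      simp only [pvOut, List.isEmpty_cons]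
      rfl

-- ===== VERDICT (by name: the statement is the Claim_ definition above) =====
theorem get_textAssembly_spec : Claim_equal_get_textAssembly := by
  intro string _
  unfold Spec_get_textAssembly
  rw [pvA_eq, pvB_eq]
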